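-- pv_equiv track=rewrite | github.com/posl/comment_recommendation | script/mod_gen/2_time/ja/178_D/6.py | solve
-- ===== SOURCE A (Python) =====
-- def solve(S):
--     dp = [0] * (S+1)
--     dp[0] = 1
--     for i in range(1, S+1):
--         for j in range(3, i+1):
--             dp[i] += dp[i-j]
--             dp[i] %= 10**9+7
--     return dp[S]
-- ===== SOURCE B (Python) =====
-- def solve(S):
--     # O(S): maintain p = (dp[0] + ... + dp[i-3]) mod 1e9+7 as a running prefix sum,
--     # so dp[i] = p directly instead of an inner scan.
--     M = 10 ** 9 + 7
--     dp = [0] * (S + 1)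
--     dp[0] = 1
--     p = 0
--     for i in range(3, S + 1):
--         p = (p + dp[i - 3]) % M
--         dp[i] = p
--     return dp[S]
-- ===== Notes on version B (the rewrite author's own statement) =====
-- stated objective: faster
-- what changed: Replaced the inner scan (for each i, summing dp[i-j] for j=3..i) by a single running prefix sum p = (dp[0]+...+dp[i-3]) mod 1e9+7, so dp[i] = p is computed in O(1) per step.
import Mathlib
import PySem

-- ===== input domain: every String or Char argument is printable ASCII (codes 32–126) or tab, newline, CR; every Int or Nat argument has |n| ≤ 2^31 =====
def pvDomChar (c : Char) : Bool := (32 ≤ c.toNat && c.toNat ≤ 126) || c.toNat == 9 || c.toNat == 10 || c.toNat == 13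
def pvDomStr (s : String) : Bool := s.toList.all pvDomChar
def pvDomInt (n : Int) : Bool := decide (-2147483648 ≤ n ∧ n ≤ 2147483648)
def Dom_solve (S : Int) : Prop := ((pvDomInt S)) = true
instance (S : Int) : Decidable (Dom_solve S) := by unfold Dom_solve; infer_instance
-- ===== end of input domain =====

-- B replaces A's inner scan by a running prefix sum p = (dp[0]+…+dp[i-3]) mod 1e9+7, O(S) instead of O(S^2).
-- All list indices in both ports are provably in range under Pre_solve (0 ≤ S), so Nat-indexed getD/set are exact there.

-- ===== PORT A =====
-- inner loop of A: 'for j in range(3, i+1): dp[i] += dp[i-j]; dp[i] %= 10**9+7'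
def solveInner (i : Int) (dp : List Int) : List Int :=
  (PySem.List.pyRange 3 (i + 1) 1).foldl
    (fun dp j =>
      let dp := dp.set i.toNat (dp.getD i.toNat 0 + dp.getD (i - j).toNat 0)
      dp.set i.toNat (PySem.Int.mod (dp.getD i.toNat 0) (10 ^ 9 + 7)))
    dp

def solve (S : Int) : Int :=
  let dp := (List.replicate (S + 1).toNat (0 : Int)).set 0 1
  let dp := (PySem.List.pyRange 1 (S + 1) 1).foldl (fun dp i => solveInner i dp) dp
  dp.getD S.toNat 0

-- ===== PORT B =====
-- loop body of B: 'p = (p + dp[i-3]) % M; dp[i] = p'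
def solveAltStep (st : List Int × Int) (i : Int) : List Int × Int :=
  let p := PySem.Int.mod (st.2 + st.1.getD (i - 3).toNat 0) (10 ^ 9 + 7)
  (st.1.set i.toNat p, p)

def solve_alt (S : Int) : Int :=
  let dp := (List.replicate (S + 1).toNat (0 : Int)).set 0 1
  let st := (PySem.List.pyRange 3 (S + 1) 1).foldl solveAltStep (dp, 0)
  st.1.getD S.toNat 0

-- ===== PRECONDITION & SPEC =====
-- Pre_ excludes S < 0, on which both Pythons raise IndexError at 'dp[0] = 1'.
def Pre_solve (S : Int) : Prop := 0 ≤ S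
instance (S : Int) : Decidable (Pre_solve S) := by unfold Pre_solve; infer_instance
def pvWitness_solve : Int := 7

def Spec_solve (S : Int) (out : Int) : Prop := out = solve_alt S
instance (S : Int) (out : Int) : Decidable (Spec_solve S out) := by unfold Spec_solve; infer_instance

-- ===== CLAIM (what is proved, stated in full; the proofs are below) =====
def Claim_equal_solve : Prop := ∀ (S : Int), Dom_solve S → Pre_solve S → Spec_solve S (solve S)

-- ===== LEMMAS AND PROOFS =====

-- the initial dp array of both programs
def pvDp0 (n : Nat) : List Int := (List.replicate n (0 : Int)).set 0 1

lemma pv_mod (a : Int) : PySem.Int.mod a (10 ^ 9 + 7) = a % (10 ^ 9 + 7) :=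
  PySem.Int.mod_eq_emod_of_pos (by norm_num)

lemma pv_getD_set_self (l : List Int) (i : Nat) (v : Int) (h : i < l.length) :
    (l.set i v).getD i 0 = v := by
  simp [List.getD, h]

lemma pv_getD_set_ne (l : List Int) (i j : Nat) (v : Int) (h : j ≠ i) :
    (l.set i v).getD j 0 = l.getD j 0 := by
  simp [List.getD, List.getElem?_set_ne (fun hh => h hh.symm)]

lemma pv_set_self (l : List Int) (i : Nat) (h : l.getD i 0 = 0) :
    l.set i 0 = l := by
  apply List.ext_getElem?
  intro n
  by_cases hn : n = i
  · subst hn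
    by_cases hl : n < l.length
    · simp only [List.getElem?_set_self hl]
      simp [List.getD, List.getElem?_eq_getElem hl] at h
      simp [List.getElem?_eq_getElem hl, h]
    · rw [List.set_eq_of_length_le (by omega)]
  · exact List.getElem?_set_ne (fun hh => hn hh.symm)

lemma pv_list_sum_range (n : Nat) (f : Nat → Int) :
    ((List.range n).map f).sum = ∑ k ∈ Finset.range n, f k := by
  induction n with
  | zero => simp
  | succ n ih => simp [List.range_succ, Finset.sum_range_succ, ih]

-- accumulation of A's inner loop: generalized over the starting point t of the j-range
lemma pv_inner_aux (dp : List Int) (m : Nat) (hm : m < dp.length) (k : Nat) :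
    ∀ (t : Nat) (a : Int), 3 ≤ t → m + 1 - t = k → a % (10 ^ 9 + 7) = a →
    (PySem.List.pyRange (t : Int) ((m : Int) + 1) 1).foldl
      (fun dp j =>
        let dp := dp.set ((m : Int)).toNat
          (dp.getD ((m : Int)).toNat 0 + dp.getD ((m : Int) - j).toNat 0)
        dp.set ((m : Int)).toNat (PySem.Int.mod (dp.getD ((m : Int)).toNat 0) (10 ^ 9 + 7)))
      (dp.set m a)
    = dp.set m ((a + ((PySem.List.pyRange (t : Int) ((m : Int) + 1) 1).map
        (fun j => dp.getD ((m : Int) - j).toNat 0)).sum) % (10 ^ 9 + 7)) := by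
  induction k with
  | zero =>
    intro t a ht hk ha
    rw [PySem.List.pyRange_one_eq_nil (by omega)]
    norm_num at ha
    simp [ha]
  | succ k ih =>
    intro t a ht hk ha
    have htm : (t : Int) < (m : Int) + 1 := by omega
    rw [PySem.List.pyRange_one_cons htm]
    simp only [List.foldl_cons, List.map_cons, List.sum_cons]
    have hne : (((m : Int) - (t : Int)).toNat) ≠ m := by omega
    have hstep :
        ((dp.set m a).set ((m : Int)).toNat
            ((dp.set m a).getD ((m : Int)).toNat 0 + (dp.set m a).getD ((m : Int) - (t : Int)).toNat 0)).set
          ((m : Int)).toNat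
          (PySem.Int.mod
            (((dp.set m a).set ((m : Int)).toNat
              ((dp.set m a).getD ((m : Int)).toNat 0 + (dp.set m a).getD ((m : Int) - (t : Int)).toNat 0)).getD
              ((m : Int)).toNat 0)
            (10 ^ 9 + 7))
        = dp.set m ((a + dp.getD ((m : Int) - (t : Int)).toNat 0) % (10 ^ 9 + 7)) := by
      simp only [Int.toNat_natCast]
      rw [pv_getD_set_self dp m a hm, pv_getD_set_ne dp m _ a hne]
      have hg : ((dp.set m a).set m (a + dp.getD ((m : Int) - (t : Int)).toNat 0)).getD m 0
          = a + dp.getD ((m : Int) - (t : Int)).toNat 0 := by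
        rw [List.set_set]; exact pv_getD_set_self dp m _ hm
      rw [hg, List.set_set, List.set_set, pv_mod]
    rw [hstep]
    have hcast : ((t : Int) + 1) = ((t + 1 : Nat) : Int) := by push_cast; ring
    rw [hcast, ih (t + 1) _ (by omega) (by omega)
      (Int.emod_emod_of_dvd _ dvd_rfl)]
    congr 1
    rw [Int.add_emod ((a + _) % _), Int.emod_emod_of_dvd _ dvd_rfl, ← Int.add_emod, add_assoc]

-- reindex the inner sum: dp[i-j] for j = 3..m equals dp[0..m-3] summed
lemma pv_sum_reindex (dp : List Int) (m : Nat) :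
    ((PySem.List.pyRange 3 ((m : Int) + 1) 1).map
      (fun j => dp.getD ((m : Int) - j).toNat 0)).sum
    = ∑ k ∈ Finset.range (m - 2), dp.getD k 0 := by
  rw [PySem.List.pyRange_one]
  have hlen : (((m : Int) + 1) - 3).toNat = m - 2 := by omega
  rw [hlen, List.map_map, pv_list_sum_range]
  have : ∀ k ∈ Finset.range (m - 2),
      ((fun j => dp.getD ((m : Int) - j).toNat 0) ∘ fun k : Nat => (3 : Int) + k) k
      = dp.getD (m - 2 - 1 - k) 0 := by
    intro k hk
    simp only [Finset.mem_range] at hk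
    have : ((m : Int) - (3 + (k : Int))).toNat = m - 2 - 1 - k := by omega
    simp [Function.comp, this]
  rw [Finset.sum_congr rfl this, Finset.sum_range_reflect (fun k => dp.getD k 0) (m - 2)]

-- A's inner loop on a fresh cell: one pass of the dp recurrence
lemma pv_inner (dp : List Int) (m : Nat) (hm : m < dp.length)
    (hz : dp.getD m 0 = 0) :
    solveInner (m : Int) dp
    = dp.set m ((∑ k ∈ Finset.range (m - 2), dp.getD k 0) % (10 ^ 9 + 7)) := by
  unfold solveInner
  conv_lhs => rw [show dp = dp.set m 0 from (pv_set_self dp m hz).symm]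
  rw [show ((m : Int) + 1) = (((m : Nat) : Int) + 1) from rfl]
  rw [show (3 : Int) = ((3 : Nat) : Int) from rfl]
  rw [pv_inner_aux dp m hm (m + 1 - 3) 3 0 (by omega) rfl (by norm_num)]
  simp only [Nat.cast_ofNat]
  rw [zero_add, pv_sum_reindex]

-- the trivial case: for i ≤ 2 both loops are empty
lemma pv_empty (n m : Nat) (h : (m : Int) + 1 ≤ 3) :
    ((PySem.List.pyRange 3 ((m : Int) + 1) 1).foldl (fun dp i => solveInner i dp) (pvDp0 n)
      = pvDp0 n
    ∧ (PySem.List.pyRange 3 ((m : Int) + 1) 1).foldl solveAltStep (pvDp0 n, 0) = (pvDp0 n, 0)) := by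
  rw [PySem.List.pyRange_one_eq_nil h]
  exact ⟨rfl, rfl⟩

lemma pv_dp0_getD_pos (n k : Nat) (hk : 0 < k) : (pvDp0 n).getD k 0 = 0 := by
  unfold pvDp0
  rw [pv_getD_set_ne _ _ _ _ (by omega)]
  by_cases h : k < n
  · simp [List.getD, h]
  · simp [List.getD, h]

lemma pv_dp0_length (n : Nat) : (pvDp0 n).length = n := by simp [pvDp0]

-- main invariant: after processing i = 3..m, B's array equals A's and B's p is the prefix sum mod M
lemma pv_outer (n m : Nat) (hmn : m < n) :
    (PySem.List.pyRange 3 ((m : Int) + 1) 1).foldl solveAltStep (pvDp0 n, 0)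
      = ((PySem.List.pyRange 3 ((m : Int) + 1) 1).foldl (fun dp i => solveInner i dp) (pvDp0 n),
         (∑ k ∈ Finset.range (m - 2),
           ((PySem.List.pyRange 3 ((m : Int) + 1) 1).foldl (fun dp i => solveInner i dp)
             (pvDp0 n)).getD k 0) % (10 ^ 9 + 7))
    ∧ ((PySem.List.pyRange 3 ((m : Int) + 1) 1).foldl (fun dp i => solveInner i dp)
        (pvDp0 n)).length = n
    ∧ (∀ k, m < k →
        ((PySem.List.pyRange 3 ((m : Int) + 1) 1).foldl (fun dp i => solveInner i dp)
          (pvDp0 n)).getD k 0 = 0) := by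
  induction m with
  | zero =>
    obtain ⟨hA, hB⟩ := pv_empty n 0 (by norm_num)
    rw [hA, hB]
    refine ⟨?_, pv_dp0_length n, fun k hk => pv_dp0_getD_pos n k hk⟩
    simp
  | succ m ih =>
    by_cases h2 : m + 2 ≤ 3
    · obtain ⟨hA, hB⟩ := pv_empty n (m + 1) (by push_cast; omega)
      rw [hA, hB]
      refine ⟨?_, pv_dp0_length n, fun k hk => pv_dp0_getD_pos n k (by omega)⟩
      have : m + 1 - 2 = 0 := by omega
      simp [this]
    · -- m ≥ 2, so i = m+1 ≥ 3 is a real iteration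
      obtain ⟨ih1, ih2, ih3⟩ := ih (by omega)
      have hsplit : PySem.List.pyRange 3 (((m + 1 : Nat) : Int) + 1) 1
          = PySem.List.pyRange 3 ((m : Int) + 1) 1 ++ [(m : Int) + 1] := by
        push_cast
        rw [show (m : Int) + 1 + 1 = ((m : Int) + 1) + 1 from by ring]
        exact PySem.List.pyRange_one_succ_right (by omega)
      set A := (PySem.List.pyRange 3 ((m : Int) + 1) 1).foldl (fun dp i => solveInner i dp)
        (pvDp0 n) with hAdef
      rw [hsplit, List.foldl_append, List.foldl_append]
      simp only [List.foldl_cons, List.foldl_nil]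
      rw [ih1]
      have hm1n : m + 1 < n := hmn
      have hinner : solveInner ((m : Int) + 1) A
          = A.set (m + 1) ((∑ k ∈ Finset.range (m + 1 - 2), A.getD k 0) % (10 ^ 9 + 7)) := by
        have := pv_inner A (m + 1) (by omega) (ih3 (m + 1) (by omega))
        rw [show (((m + 1 : Nat)) : Int) = (m : Int) + 1 from by push_cast; ring] at this
        exact this
      have hstep : solveAltStep (A, (∑ k ∈ Finset.range (m - 2), A.getD k 0) % (10 ^ 9 + 7))
          ((m : Int) + 1)
          = (A.set (m + 1) ((∑ k ∈ Finset.range (m + 1 - 2), A.getD k 0) % (10 ^ 9 + 7)),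
             (∑ k ∈ Finset.range (m + 1 - 2), A.getD k 0) % (10 ^ 9 + 7)) := by
        unfold solveAltStep
        have hidx : (((m : Int) + 1) - 3).toNat = m - 2 := by omega
        have hitoNat : (((m : Int) + 1)).toNat = m + 1 := by omega
        have hsum : ((∑ k ∈ Finset.range (m - 2), A.getD k 0) % (10 ^ 9 + 7)
            + A.getD (m - 2) 0) % (10 ^ 9 + 7)
            = (∑ k ∈ Finset.range (m + 1 - 2), A.getD k 0) % (10 ^ 9 + 7) := by
          rw [Int.add_emod ((∑ k ∈ Finset.range (m - 2), A.getD k 0) % (10 ^ 9 + 7)),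
            Int.emod_emod_of_dvd _ dvd_rfl, ← Int.add_emod]
          congr 1
          rw [show m + 1 - 2 = (m - 2) + 1 from by omega, Finset.sum_range_succ]
        simp only [pv_mod, hidx, hitoNat, hsum]
      rw [hinner, hstep]
      refine ⟨?_, by simp [List.length_set, ih2], ?_⟩
      · congr 2
        apply Finset.sum_congr rfl
        intro k hk
        simp only [Finset.mem_range] at hk
        exact (pv_getD_set_ne A (m + 1) k _ (by omega)).symm
      · intro k hk
        rw [pv_getD_set_ne A (m + 1) k _ (by omega)]
        exact ih3 k (by omega)

-- A's outer loop over 1..S equals the loop over 3..S: iterations i = 1, 2 are no-ops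
lemma pv_skip (m : Nat) (dp : List Int) :
    (PySem.List.pyRange 1 ((m : Int) + 1) 1).foldl (fun dp i => solveInner i dp) dp
    = (PySem.List.pyRange 3 ((m : Int) + 1) 1).foldl (fun dp i => solveInner i dp) dp := by
  have h1 : solveInner 1 dp = dp := by
    unfold solveInner
    rw [PySem.List.pyRange_one_eq_nil (by norm_num)]
    rfl
  have h2 : solveInner 2 dp = dp := by
    unfold solveInner
    rw [PySem.List.pyRange_one_eq_nil (by norm_num)]
    rfl
  match m with
  | 0 =>
    rw [PySem.List.pyRange_one_eq_nil (by norm_num), PySem.List.pyRange_one_eq_nil (by norm_num)]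
  | 1 =>
    rw [PySem.List.pyRange_one_cons (by norm_num), PySem.List.pyRange_one_eq_nil (by norm_num),
      PySem.List.pyRange_one_eq_nil (by norm_num)]
    simp only [List.foldl_cons, List.foldl_nil]
    rw [h1]
  | (m + 2) =>
    rw [PySem.List.pyRange_one_append 1 3 (((m + 2 : Nat) : Int) + 1) (by norm_num)
        (by push_cast; omega),
      show PySem.List.pyRange 1 3 1 = [1, 2] from by decide, List.foldl_append]
    simp only [List.foldl_cons, List.foldl_nil]
    rw [h1, h2]

-- ===== VERDICT (by name: the statement is the Claim_ definition above) =====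
theorem solve_spec : Claim_equal_solve := by
  intro S _ hpre
  unfold Spec_solve solve solve_alt
  have hS : S = ((S.toNat : Nat) : Int) := (Int.toNat_of_nonneg hpre).symm
  rw [hS]
  set m := S.toNat
  have hn : ((m : Int) + 1).toNat = m + 1 := by omega
  simp only [hn, Int.toNat_natCast]
  rw [show (List.replicate (m + 1) (0 : Int)).set 0 1 = pvDp0 (m + 1) from rfl]
  rw [pv_skip m (pvDp0 (m + 1))]
  obtain ⟨h1, _, _⟩ := pv_outer (m + 1) m (by omega)
  rw [h1]
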